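-- pv_equiv track=rewrite | github.com/eas613/hello-world | exe_4.py | similar_signif_num_rec
-- ===== SOURCE A (Python) =====
-- def num_length_rec(num,num_length = 1):
--     if num < 10:
--         return num_length
--     return num_length_rec(num // 10 , num_length *10)
--
-- def similar_signif_num_rec(num1,num2,len1=None,len2 =None,similar=None):
--     if len1 is None :
--         len1 = num_length_rec(num1)
--         len2 = num_length_rec(num2)
--     if len1 == 0 or len2 == 0:
--         return similar
--     if num1 // len1 == num2 // len2:
--         similar = num1 //len1
--
--     return similar_signif_num_rec(num1,num2,len1//10,len2//10,similar)
-- ===== SOURCE B (Python) =====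
-- # B: collect the (scale1, scale2) pairs once into a list, then scan it in
-- # reverse and return on the FIRST match (= A's last match), instead of A's
-- # tail recursion threading a `similar` accumulator.
--
-- def _leading_scale(num):
--     scale = 1
--     while num >= 10:
--         num //= 10
--         scale *= 10
--     return scale
--
--
-- def similar_signif_num_rec(num1, num2, len1=None, len2=None, similar=None):
--     if len1 is None:
--         len1 = _leading_scale(num1)
--         len2 = _leading_scale(num2)
--     pairs = []
--     while len1 != 0 and len2 != 0:
--         pairs.append((len1, len2))
--         len1 //= 10
--         len2 //= 10
--     for a, b in reversed(pairs):
--         if num1 // a == num2 // b: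
--             return num1 // a
--     return similar
-- ===== Notes on version B (the rewrite author's own statement) =====
-- stated objective: alternative
-- what changed: Replaces A's tail recursion threading a `similar` accumulator (plus a recursive digit-count helper) by materializing the list of (scale1, scale2) pairs once with a while loop and scanning it in reverse, returning on the first match.
import Mathlib
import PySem

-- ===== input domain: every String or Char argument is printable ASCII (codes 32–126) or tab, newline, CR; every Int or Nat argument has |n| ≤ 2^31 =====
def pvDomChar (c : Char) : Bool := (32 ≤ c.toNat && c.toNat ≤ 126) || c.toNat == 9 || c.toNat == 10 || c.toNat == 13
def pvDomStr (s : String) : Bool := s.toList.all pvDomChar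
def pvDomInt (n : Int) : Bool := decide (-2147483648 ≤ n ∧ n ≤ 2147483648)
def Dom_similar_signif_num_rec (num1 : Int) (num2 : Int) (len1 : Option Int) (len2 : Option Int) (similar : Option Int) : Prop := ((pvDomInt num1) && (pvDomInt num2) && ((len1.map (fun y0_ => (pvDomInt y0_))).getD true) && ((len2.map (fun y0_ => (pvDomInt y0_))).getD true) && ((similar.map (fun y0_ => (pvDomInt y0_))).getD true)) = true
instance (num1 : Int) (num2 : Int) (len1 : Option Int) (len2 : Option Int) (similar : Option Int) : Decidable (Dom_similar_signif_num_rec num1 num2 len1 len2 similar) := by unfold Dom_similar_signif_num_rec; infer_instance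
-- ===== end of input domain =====

-- B materializes the (scale1, scale2) pairs once and scans them in reverse for the first match, instead of A's accumulator tail recursion (objective: alternative, not faster).

-- ===== PORT A =====
-- num_length_rec, fuel-bounded (fuel only makes the recursion total; with fuel > |num| it is Python's recursion exactly)
def numLengthRec (num numLength : Int) (fuel : Nat) : Int :=
  match fuel with
  | 0 => numLength
  | f+1 => if num < 10 then numLength else numLengthRec (PySem.Int.floordiv num 10) (numLength * 10) f

-- the recursive calls of similar_signif_num_rec (len1, len2 always ints there), fuel-bounded
def srecA (num1 num2 a b : Int) (similar : Option Int) (fuel : Nat) : Option Int :=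
  match fuel with
  | 0 => similar
  | f+1 =>
    if a = 0 ∨ b = 0 then similar
    else
      srecA num1 num2 (PySem.Int.floordiv a 10) (PySem.Int.floordiv b 10)
        (if PySem.Int.floordiv num1 a = PySem.Int.floordiv num2 b then some (PySem.Int.floordiv num1 a)
         else similar) f

def similar_signif_num_rec (num1 : Int) (num2 : Int) (len1 : Option Int) (len2 : Option Int) (similar : Option Int) : Option Int :=
  match len1 with
  | none =>
      let a := numLengthRec num1 1 (num1.natAbs + 1)
      let b := numLengthRec num2 1 (num2.natAbs + 1)
      srecA num1 num2 a b similar (a.natAbs + b.natAbs + 1)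
  | some a =>
      match len2 with
      | some b => srecA num1 num2 a b similar (a.natAbs + b.natAbs + 1)
      | none => similar  -- Python returns similar when a = 0; for a ≠ 0 it raises TypeError (outside Pre_)

-- ===== PORT B =====
-- _leading_scale's while loop, fuel-bounded
def scaleLoop (num scale : Int) (fuel : Nat) : Int :=
  match fuel with
  | 0 => scale
  | f+1 => if 10 ≤ num then scaleLoop (PySem.Int.floordiv num 10) (scale * 10) f else scale

-- B's first while loop: the list of (len1, len2) pairs, fuel-bounded
def pairsLoop (a b : Int) (fuel : Nat) : List (Int × Int) :=
  match fuel with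
  | 0 => []
  | f+1 =>
    if a ≠ 0 ∧ b ≠ 0 then
      (a, b) :: pairsLoop (PySem.Int.floordiv a 10) (PySem.Int.floordiv b 10) f
    else []

-- B's for loop over reversed(pairs): first match wins, else fall through to `return similar`
def findSim (num1 num2 : Int) (similar : Option Int) (ps : List (Int × Int)) : Option Int :=
  match ps.find? (fun p => PySem.Int.floordiv num1 p.1 == PySem.Int.floordiv num2 p.2) with
  | some p => some (PySem.Int.floordiv num1 p.1)
  | none => similar

def similar_signif_num_rec_alt (num1 : Int) (num2 : Int) (len1 : Option Int) (len2 : Option Int) (similar : Option Int) : Option Int :=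
  match len1 with
  | none =>
      let a := scaleLoop num1 1 (num1.natAbs + 1)
      let b := scaleLoop num2 1 (num2.natAbs + 1)
      findSim num1 num2 similar (pairsLoop a b (a.natAbs + b.natAbs + 1)).reverse
  | some a =>
      match len2 with
      | some b => findSim num1 num2 similar (pairsLoop a b (a.natAbs + b.natAbs + 1)).reverse
      | none => similar  -- Python B: for a = 0 the while loop exits and it returns similar; for a ≠ 0 it raises TypeError (outside Pre_)

-- ===== PRECONDITION & SPEC =====
-- Pre_ excludes only inputs on which Python A raises: len2 = None with len1 a nonzero int (TypeError: int // None),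
-- and both explicit scales negative (the recursion never reaches 0: RecursionError).
def Pre_similar_signif_num_rec (num1 : Int) (num2 : Int) (len1 : Option Int) (len2 : Option Int) (similar : Option Int) : Prop :=
  len1 = none ∨ (len2 = none ∧ len1 = some 0) ∨
    (len1.isSome ∧ len2.isSome ∧ (0 ≤ len1.getD 0 ∨ 0 ≤ len2.getD 0))
instance (num1 : Int) (num2 : Int) (len1 : Option Int) (len2 : Option Int) (similar : Option Int) : Decidable (Pre_similar_signif_num_rec num1 num2 len1 len2 similar) := by unfold Pre_similar_signif_num_rec; infer_instance

def pvWitness_similar_signif_num_rec : Int × Int × Option Int × Option Int × Option Int := (123456, 123982, none, none, none)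

def Spec_similar_signif_num_rec (num1 : Int) (num2 : Int) (len1 : Option Int) (len2 : Option Int) (similar : Option Int) (out : Option Int) : Prop := out = similar_signif_num_rec_alt num1 num2 len1 len2 similar
instance (num1 : Int) (num2 : Int) (len1 : Option Int) (len2 : Option Int) (similar : Option Int) (out : Option Int) : Decidable (Spec_similar_signif_num_rec num1 num2 len1 len2 similar out) := by unfold Spec_similar_signif_num_rec; infer_instance

-- ===== CLAIM =====
def Claim_equal_similar_signif_num_rec : Prop := ∀ (num1 : Int) (num2 : Int) (len1 : Option Int) (len2 : Option Int) (similar : Option Int), Dom_similar_signif_num_rec num1 num2 len1 len2 similar → Pre_similar_signif_num_rec num1 num2 len1 len2 similar → Spec_similar_signif_num_rec num1 num2 len1 len2 similar (similar_signif_num_rec num1 num2 len1 len2 similar)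

-- ===== LEMMAS AND PROOFS =====

lemma numLengthRec_eq_scaleLoop (f : Nat) : ∀ (num s : Int), numLengthRec num s f = scaleLoop num s f := by
  induction f with
  | zero => intro num s; rfl
  | succ f ih =>
    intro num s
    simp only [numLengthRec, scaleLoop]
    by_cases h : num < 10
    · rw [if_pos h, if_neg (by omega)]
    · rw [if_neg h, if_pos (by omega)]
      exact ih _ _

lemma scaleLoop_pos (f : Nat) : ∀ (num s : Int), 0 < s → 0 < scaleLoop num s f := by
  induction f with
  | zero => intro num s hs; exact hs
  | succ f ih =>
    intro num s hs
    simp only [scaleLoop]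
    split
    · exact ih _ _ (by omega)
    · exact hs

lemma findSim_append_single (num1 num2 a b : Int) (sim : Option Int) (l : List (Int × Int)) :
    findSim num1 num2 sim (l ++ [(a, b)]) =
      findSim num1 num2
        (if PySem.Int.floordiv num1 a = PySem.Int.floordiv num2 b
         then some (PySem.Int.floordiv num1 a) else sim) l := by
  simp only [findSim, List.find?_append]
  cases h : l.find? (fun p => PySem.Int.floordiv num1 p.1 == PySem.Int.floordiv num2 p.2) with
  | some p => simp
  | none =>
    simp only [Option.none_or]
    by_cases hm : PySem.Int.floordiv num1 a = PySem.Int.floordiv num2 b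
    · rw [List.find?_cons_of_pos (by simp [hm])]
      simp [hm]
    · rw [List.find?_cons_of_neg (by simp [hm]), List.find?_nil]
      simp [hm]

lemma srecA_eq_findSim (num1 num2 : Int) (f : Nat) :
    ∀ (g : Nat) (a b : Int) (sim : Option Int),
      ((0 ≤ a ∧ a.natAbs < f ∧ a.natAbs < g) ∨ (0 ≤ b ∧ b.natAbs < f ∧ b.natAbs < g)) →
      srecA num1 num2 a b sim f =
        findSim num1 num2 sim (pairsLoop a b g).reverse := by
  induction f with
  | zero => intro g a b sim h; omega
  | succ f ih =>
    intro g a b sim h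
    by_cases h0 : a = 0 ∨ b = 0
    · cases g with
      | zero => omega
      | succ g' =>
        have : ¬ (a ≠ 0 ∧ b ≠ 0) := by tauto
        simp [srecA, pairsLoop, if_pos h0, if_neg this, findSim]
    · rw [not_or] at h0
      obtain ⟨ha0, hb0⟩ := h0
      cases g with
      | zero => omega
      | succ g' =>
        have hda := PySem.Int.floordiv_eq_ediv_of_pos (a := a) (show (0:Int) < 10 by norm_num)
        have hdb := PySem.Int.floordiv_eq_ediv_of_pos (a := b) (show (0:Int) < 10 by norm_num)
        simp only [srecA, pairsLoop, if_pos (And.intro ha0 hb0), List.reverse_cons]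
        rw [if_neg (by tauto), findSim_append_single]
        apply ih
        rcases h with ⟨ha, hf, hg⟩ | ⟨hb, hf, hg⟩
        · left; rw [hda]; omega
        · right; rw [hdb]; omega

-- ===== VERDICT =====
theorem similar_signif_num_rec_spec : Claim_equal_similar_signif_num_rec := by
  intro num1 num2 len1 len2 similar _ hPre
  unfold Spec_similar_signif_num_rec
  cases len1 with
  | none =>
    simp only [similar_signif_num_rec, similar_signif_num_rec_alt]
    rw [numLengthRec_eq_scaleLoop, numLengthRec_eq_scaleLoop]
    have h1 := scaleLoop_pos (num1.natAbs + 1) num1 1 (by norm_num)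
    exact srecA_eq_findSim num1 num2 _ _ _ _ _ (Or.inl ⟨by omega, by omega, by omega⟩)
  | some a =>
    cases len2 with
    | none =>
      simp [similar_signif_num_rec, similar_signif_num_rec_alt]
    | some b =>
      have hab : 0 ≤ a ∨ 0 ≤ b := by
        rcases hPre with h | ⟨h, _⟩ | ⟨_, _, h⟩
        · exact absurd h (by simp)
        · exact absurd h (by simp)
        · simpa using h
      simp only [similar_signif_num_rec, similar_signif_num_rec_alt]
      apply srecA_eq_findSim
      rcases hab with h | h
      · exact Or.inl ⟨h, by omega, by omega⟩
      · exact Or.inr ⟨h, by omega, by omega⟩
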